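-- pv_equiv track=rewrite | github.com/seongtaek5/KR-Ind-Quant-Dashboard | price_data_collect.py | _choose_best_ticker
-- ===== SOURCE A (Python) =====
-- def _choose_best_ticker(candidates: list[tuple[str, str]], preferred_keywords: list[str]) -> str | None:
--     if not candidates:
--         return None
--
--     # 1순위: 완전 일치에 가까운 이름
--     for keyword in preferred_keywords:
--         exact = [t for t, name in candidates if name == f"KODEX {keyword}"]
--         if exact:
--             return exact[0]
--
--     # 2순위: 이름이 짧은 상품 우선
--     candidates_sorted = sorted(candidates, key=lambda x: len(x[1]))
--     return candidates_sorted[0][0]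
-- ===== SOURCE B (Python) =====
-- def _choose_best_ticker(candidates: list[tuple[str, str]], preferred_keywords: list[str]) -> str | None:
--     if not candidates:
--         return None
--
--     # Different algorithm: instead of staged passes (one scan per keyword, then a
--     # full sort), score every candidate ONCE with a composite key
--     # (keyword-rank, tie-break) and take a single stable min over candidates.
--     # rank maps "KODEX <kw>" -> first index of kw in preferred_keywords.
--     rank = {}
--     for i, kw in enumerate(preferred_keywords):
--         rank.setdefault(f"KODEX {kw}", i)
--     unmatched = len(preferred_keywords)
--
--     def score(c):
--         r = rank.get(c[1])
--         return (r, 0) if r is not None else (unmatched, len(c[1]))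
--
--     return min(candidates, key=score)[0]
-- ===== Notes on version B (the rewrite author's own statement) =====
-- stated objective: faster
-- what changed: Replaced A's staged decision list (one scan of candidates per keyword, then a full sort for the fallback) by a single-pass ranking: each candidate is scored once with a composite (keyword-rank, name-length) key built from a first-occurrence rank dict, and one stable min over candidates yields the answer.
import Mathlib
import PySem

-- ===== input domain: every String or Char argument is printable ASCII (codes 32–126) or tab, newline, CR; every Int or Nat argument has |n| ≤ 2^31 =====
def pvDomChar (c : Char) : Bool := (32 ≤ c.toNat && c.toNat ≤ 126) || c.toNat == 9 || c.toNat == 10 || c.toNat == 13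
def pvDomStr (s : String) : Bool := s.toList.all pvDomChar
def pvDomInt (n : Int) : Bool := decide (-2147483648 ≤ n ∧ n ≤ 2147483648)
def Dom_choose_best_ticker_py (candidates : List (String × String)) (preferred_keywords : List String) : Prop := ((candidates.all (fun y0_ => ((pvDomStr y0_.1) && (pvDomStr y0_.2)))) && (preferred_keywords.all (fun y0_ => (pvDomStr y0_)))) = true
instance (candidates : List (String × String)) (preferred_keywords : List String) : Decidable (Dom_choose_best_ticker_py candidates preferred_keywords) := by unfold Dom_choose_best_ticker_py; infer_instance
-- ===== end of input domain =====

-- B replaces A's staged passes (one candidate scan per keyword, then a full sort)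
-- by scoring every candidate once with a composite (keyword-rank, name-length) key
-- and taking a single stable min (objective: faster).

-- ===== PORT A =====
-- A's keyword loop: for each keyword, the comprehension + truthiness test + exact[0]
def pvA_kwLoop (candidates : List (String × String)) : List String → Option String
  | [] => none
  | k :: rest =>
    let exact := (candidates.filter (fun p => p.2 == "KODEX " ++ k)).map Prod.fst
    match exact with
    | t :: _ => some t
    | [] => pvA_kwLoop candidates rest

def choose_best_ticker_py (candidates : List (String × String)) (preferred_keywords : List String) : Option String :=
  if candidates = [] then none
  else
    match pvA_kwLoop candidates preferred_keywords with
    | some t => some t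
    | none =>
      -- candidates_sorted[0][0]; the [] arm is unreachable (candidates ≠ [])
      match PySem.List.sorted candidates (fun x => PySem.Str.len x.2) false with
      | p :: _ => some p.1
      | [] => none

-- ===== PORT B =====
def choose_best_ticker_py_alt (candidates : List (String × String)) (preferred_keywords : List String) : Option String :=
  if candidates = [] then none
  else
    let rank := (PySem.List.enumerate preferred_keywords).foldl
      (fun d p => d.setdefault ("KODEX " ++ p.2) p.1) PySem.Dict.empty
    let k1 : String × String → Int := fun c =>
      match rank.get? c.2 with
      | some r => r
      | none => (preferred_keywords.length : Int)
    let k2 : String × String → Int := fun c =>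
      match rank.get? c.2 with
      | some _ => 0
      | none => PySem.Str.len c.2
    -- min(candidates, key=score) with the tuple key (k1 c, k2 c)
    (PySem.List.min2? candidates k1 k2).map Prod.fst

-- ===== PRECONDITION & SPEC =====
def Spec_choose_best_ticker_py (candidates : List (String × String)) (preferred_keywords : List String) (out : Option String) : Prop := out = choose_best_ticker_py_alt candidates preferred_keywords
instance (candidates : List (String × String)) (preferred_keywords : List String) (out : Option String) : Decidable (Spec_choose_best_ticker_py candidates preferred_keywords out) := by unfold Spec_choose_best_ticker_py; infer_instance

-- ===== CLAIM (what is proved, stated in full; the proofs are below) =====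
def Claim_equal_choose_best_ticker_py : Prop := ∀ (candidates : List (String × String)) (preferred_keywords : List String), Dom_choose_best_ticker_py candidates preferred_keywords → Spec_choose_best_ticker_py candidates preferred_keywords (choose_best_ticker_py candidates preferred_keywords)

-- ===== LEMMAS AND PROOFS =====

-- rank of a name under kws: first index i with "KODEX " ++ kws[i] = name
def pvRank? (kws : List String) (name : String) : Option Nat :=
  kws.findIdx? (fun k => ("KODEX " ++ k) == name)

def pvK1 (kws : List String) (c : String × String) : Int :=
  match pvRank? kws c.2 with
  | some r => (r : Int)
  | none => (kws.length : Int)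

def pvK2 (kws : List String) (c : String × String) : Int :=
  match pvRank? kws c.2 with
  | some _ => 0
  | none => PySem.Str.len c.2

-- min2?'s replacement test, i.e. Python's strict lexicographic < on the score tuple
def pvLt {α : Type} (k1 k2 : α → Int) (x m : α) : Bool :=
  decide (k1 x < k1 m) || (!decide (k1 m < k1 x) && decide (k2 x < k2 m))

-- keep the earlier element x unless a strictly smaller later minimum m exists
def pvPick {α : Type} (lt : α → α → Bool) (x : α) : Option α → α
  | none => x
  | some m => if lt m x then m else x

-- first minimum, as a structural recursion (proof vehicle)
def pvSfm {α : Type} (lt : α → α → Bool) : List α → Option α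
  | [] => none
  | x :: xs => some (pvPick lt x (pvSfm lt xs))

-- the first-min fold step of min?/min2?
def pvStep {α : Type} (lt : α → α → Bool) : Option α → α → Option α
  | none, x => some x
  | some m, x => if lt x m then some x else some m

theorem pvSfm_mem {α : Type} (lt : α → α → Bool) (l : List α) (m : α)
    (h : pvSfm lt l = some m) : m ∈ l := by
  induction l with
  | nil => simp [pvSfm] at h
  | cons x xs ih =>
    simp only [pvSfm, Option.some.injEq] at h
    cases hs : pvSfm lt xs with
    | none => rw [hs] at h; simp [pvPick] at h; simp [h]
    | some m' =>
      rw [hs] at h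
      by_cases hlt : lt m' x = true
      · simp [pvPick, hlt] at h; subst h; exact List.mem_cons_of_mem _ (ih hs)
      · simp [pvPick, hlt] at h; subst h; exact List.mem_cons_self ..

-- an Option-seeded first-min foldl equals pvSfm, for any strict order lt that is
-- transitive and negatively transitive
theorem pvFold_eq_sfm {α : Type} (lt : α → α → Bool)
    (htr : ∀ a b c : α, lt a b = true → lt b c = true → lt a c = true)
    (hntr : ∀ a b c : α, lt a b = false → lt b c = false → lt a c = false)
    (l : List α) :
    l.foldl (pvStep lt) none = pvSfm lt l := by
  suffices h : ∀ (xs : List α) (b : α),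
      xs.foldl (pvStep lt) (some b) = some (pvPick lt b (pvSfm lt xs)) by
    cases l with
    | nil => rfl
    | cons x xs =>
      simp only [List.foldl_cons, pvStep]
      rw [h xs x]
      simp only [pvSfm]
  intro xs
  induction xs with
  | nil => intro b; simp [pvSfm, pvPick]
  | cons x xs ih =>
    intro b
    simp only [List.foldl_cons, pvStep]
    by_cases hxb : lt x b = true
    · rw [if_pos hxb, ih x]
      simp only [pvSfm]
      cases hs : pvSfm lt xs with
      | none => simp [pvPick, hxb]
      | some m =>
        by_cases hmx : lt m x = true
        · simp [pvPick, hmx, htr _ _ _ hmx hxb]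
        · have h1 : lt m x = false := by simpa using hmx
          simp [pvPick, h1, hxb]
    · have h1 : lt x b = false := by simpa using hxb
      rw [if_neg (by simp [h1]), ih b]
      simp only [pvSfm]
      cases hs : pvSfm lt xs with
      | none => simp [pvPick, h1]
      | some m =>
        by_cases hmx : lt m x = true
        · simp [pvPick, hmx]
        · have h2 : lt m x = false := by simpa using hmx
          simp [pvPick, h1, h2, hntr _ _ _ h2 h1]

theorem pvSfm_congr {α : Type} (lt1 lt2 : α → α → Bool) (l : List α)
    (h : ∀ x ∈ l, ∀ y ∈ l, lt1 x y = lt2 x y) : pvSfm lt1 l = pvSfm lt2 l := by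
  induction l with
  | nil => rfl
  | cons x xs ih =>
    have ih' := ih (fun a ha b hb => h a (List.mem_cons_of_mem _ ha) b (List.mem_cons_of_mem _ hb))
    simp only [pvSfm, ih']
    cases hs : pvSfm lt2 xs with
    | none => simp [pvPick]
    | some m =>
      have hm : m ∈ xs := pvSfm_mem _ _ _ hs
      simp [pvPick, h m (List.mem_cons_of_mem _ hm) x (List.mem_cons_self ..)]

-- pvSfm finds the first "bottom" element when one exists
theorem pvSfm_find_bottom {α : Type} (lt : α → α → Bool) (p : α → Bool) (l : List α)
    (hex : ∃ x ∈ l, p x = true)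
    (hmin : ∀ x ∈ l, ∀ y ∈ l, p y = true → lt x y = false)
    (hlt : ∀ x ∈ l, ∀ y ∈ l, p x = true → p y = false → lt x y = true) :
    pvSfm lt l = l.find? p := by
  induction l with
  | nil => simp at hex
  | cons x xs ih =>
    by_cases hpx : p x = true
    · rw [List.find?_cons_of_pos hpx]
      simp only [pvSfm]
      cases hs : pvSfm lt xs with
      | none => simp [pvPick]
      | some m =>
        have hm : m ∈ xs := pvSfm_mem _ _ _ hs
        have hf := hmin m (List.mem_cons_of_mem _ hm) x (List.mem_cons_self ..) hpx
        simp [pvPick, hf]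
    · have hpx' : p x = false := by simpa using hpx
      obtain ⟨z, hz, hpz⟩ := hex
      have hzxs : z ∈ xs := by
        rcases List.mem_cons.mp hz with h1 | h1
        · subst h1; rw [hpz] at hpx'; simp at hpx'
        · exact h1
      have ihe := ih ⟨z, hzxs, hpz⟩
        (fun a ha b hb hpb => hmin a (List.mem_cons_of_mem _ ha) b (List.mem_cons_of_mem _ hb) hpb)
        (fun a ha b hb hpa hpb => hlt a (List.mem_cons_of_mem _ ha) b (List.mem_cons_of_mem _ hb) hpa hpb)
      cases hf : xs.find? p with
      | none =>
        exact absurd (List.find?_eq_none.mp hf z hzxs) (by simp [hpz])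
      | some m =>
        have hpm : p m = true := List.find?_some hf
        have hm : m ∈ xs := List.mem_of_find?_eq_some hf
        have hltmx := hlt m (List.mem_cons_of_mem _ hm) x (List.mem_cons_self ..) hpm hpx'
        rw [List.find?_cons_of_neg (by simp [hpx'])]
        simp only [pvSfm, ihe, hf]
        simp [pvPick, hltmx]

-- keys are nonnegative: 0 ≤ pvK1, 0 ≤ pvK2
theorem pvK1_nonneg (kws : List String) (c : String × String) : 0 ≤ pvK1 kws c := by
  unfold pvK1; cases pvRank? kws c.2 <;> simp
theorem pvK2_nonneg (kws : List String) (c : String × String) : 0 ≤ pvK2 kws c := by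
  unfold pvK2 PySem.Str.len; cases pvRank? kws c.2 <;> simp

-- the rank dict built by B's setdefault fold looks up pvRank?
theorem pv_dict_get (kws : List String) (s : String) :
    ∀ (i0 : Int) (d : PySem.Dict String Int),
    ((PySem.List.enumerate kws i0).foldl (fun d p => d.setdefault ("KODEX " ++ p.2) p.1) d).get? s
      = (d.get? s).or ((pvRank? kws s).map (fun n => i0 + n)) := by
  induction kws with
  | nil =>
    intro i0 d
    simp only [PySem.List.enumerate_nil, List.foldl_nil, pvRank?, List.findIdx?_nil]
    cases hd : d.get? s <;> rfl
  | cons k rest ih =>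
    intro i0 d
    rw [PySem.List.enumerate_cons]
    simp only [List.foldl_cons]
    rw [ih]
    unfold pvRank?
    rw [List.findIdx?_cons]
    by_cases h : ("KODEX " ++ k) = s
    · have hb : (("KODEX " ++ k) == s) = true := by simp [h]
      rw [hb]
      simp only [if_true]
      rw [h, PySem.Dict.get?_setdefault_self]
      cases hd : d.get? s <;> simp [Option.or]
    · have hb : (("KODEX " ++ k) == s) = false := by simp [h]
      rw [hb]
      simp only [Bool.false_eq_true, if_false]
      rw [PySem.Dict.get?_setdefault_of_ne _ _ (fun hs => h hs.symm)]
      cases hd : d.get? s <;> cases hr : rest.findIdx? (fun k => ("KODEX " ++ k) == s) <;>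
        simp [Option.or] <;> omega

-- (filter p).head? is find? p
theorem pv_filter_head {α : Type} (p : α → Bool) (l : List α) :
    (l.filter p).head? = l.find? p := by
  induction l with
  | nil => rfl
  | cons x xs ih =>
    by_cases h : p x = true
    · rw [List.filter_cons_of_pos h, List.find?_cons_of_pos h]; rfl
    · have h' : p x = false := by simpa using h
      rw [List.filter_cons_of_neg (by simp [h']), List.find?_cons_of_neg (by simp [h']), ih]

-- pvRank? on k :: rest when k does not match the name
theorem pvRank?_cons_of_ne (k : String) (rest : List String) (s : String)
    (h : (("KODEX " ++ k) == s) = false) :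
    pvRank? (k :: rest) s = (pvRank? rest s).map (· + 1) := by
  unfold pvRank?; rw [List.findIdx?_cons, h]; simp

-- A's fallback: head of the stable sort is the first length-minimum (from min?)
theorem pv_head_insertBy {α : Type} (before : α → α → Bool) (x : α) (acc : List α) :
    (PySem.List.insertBy before x acc).head? =
      some (match acc.head? with | none => x | some y => if before x y then x else y) := by
  cases acc with
  | nil => rfl
  | cons y ys =>
    simp only [PySem.List.insertBy, List.head?_cons]
    split <;> simp_all

theorem pv_sorted_head_min {α : Type} (xs : List α) (key : α → Int) :
    (PySem.List.sorted xs key false).head? = PySem.List.min? xs key := by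
  suffices h : ∀ (acc : List α),
      (xs.foldl (fun acc x => PySem.List.insertBy (fun a b => decide (key a < key b)) x acc) acc).head? =
      xs.foldl (fun o x => match o with
        | none => some x
        | some m => if key x < key m then some x else some m) acc.head? by
    simpa [PySem.List.sorted, PySem.List.min?] using h []
  induction xs with
  | nil => intro acc; rfl
  | cons x rest ih =>
    intro acc
    simp only [List.foldl_cons]
    rw [ih, pv_head_insertBy]
    cases acc with
    | nil => rfl
    | cons y ys =>
      simp only [List.head?_cons]
      by_cases h : key x < key y <;> simp [h]

-- pointwise-equal folds agree
theorem pv_fold_ext {α β : Type} (f g : β → α → β) (h : ∀ b a, f b a = g b a)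
    (init : β) (xs : List α) : xs.foldl f init = xs.foldl g init := by
  induction xs generalizing init with
  | nil => rfl
  | cons x xs ih => simp only [List.foldl_cons, h]; exact ih _

-- min? with an Int key, as pvSfm
theorem pv_min?_eq_sfm {α : Type} (xs : List α) (key : α → Int) :
    PySem.List.min? xs key = pvSfm (fun x m => decide (key x < key m)) xs := by
  unfold PySem.List.min?
  refine (pv_fold_ext _ (pvStep (fun x m => decide (key x < key m)))
    (by intro acc x; cases acc <;> simp [pvStep]) none xs).trans ?_
  exact pvFold_eq_sfm _ (by intro a b c h1 h2; simp at *; omega)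
    (by intro a b c h1 h2; simp at *; omega) xs

-- min2? with Int keys, as pvSfm over pvLt
theorem pv_min2?_eq_sfm {α : Type} (xs : List α) (k1 k2 : α → Int) :
    PySem.List.min2? xs k1 k2 = pvSfm (pvLt k1 k2) xs := by
  unfold PySem.List.min2?
  refine (pv_fold_ext _ (pvStep (pvLt k1 k2))
    (by intro acc x; cases acc <;> simp [pvStep, pvLt]) none xs).trans ?_
  exact pvFold_eq_sfm _ (by intro a b c h1 h2; simp [pvLt] at *; omega)
    (by intro a b c h1 h2; simp [pvLt] at *; omega) xs

-- MAIN A-side characterisation: A is the first candidate minimising the composite key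
theorem pvA_char (kws : List String) (cs : List (String × String)) :
    choose_best_ticker_py cs kws
      = if cs = [] then none
        else (pvSfm (pvLt (pvK1 kws) (pvK2 kws)) cs).map Prod.fst := by
  induction kws with
  | nil =>
    unfold choose_best_ticker_py
    by_cases hc : cs = []
    · simp [hc]
    · simp only [if_neg hc, pvA_kwLoop]
      have hchain : PySem.List.min? cs (fun x => PySem.Str.len x.2)
          = pvSfm (pvLt (pvK1 []) (pvK2 [])) cs := by
        rw [pv_min?_eq_sfm]
        apply pvSfm_congr
        intro x _ y _
        have hx : pvRank? [] x.2 = none := rfl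
        have hy : pvRank? [] y.2 = none := rfl
        simp [pvLt, pvK1, pvK2, hx, hy]
      cases hs : PySem.List.sorted cs (fun x => PySem.Str.len x.2) false with
      | nil => exact absurd ((PySem.List.sorted_eq_nil_iff _ _ _).mp hs) hc
      | cons p t =>
        have h1 : some p = pvSfm (pvLt (pvK1 []) (pvK2 [])) cs := by
          rw [← hchain, ← pv_sorted_head_min, hs]; rfl
        rw [← h1]
        rfl
  | cons k rest ih =>
    by_cases hc : cs = []
    · simp [choose_best_ticker_py, hc]
    · cases hex : (cs.filter (fun p => p.2 == "KODEX " ++ k)).map Prod.fst with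
      | cons t ts =>
        -- exact match: A returns t = first candidate named "KODEX k"
        have hAval : choose_best_ticker_py cs (k :: rest) = some t := by
          unfold choose_best_ticker_py
          simp only [if_neg hc, pvA_kwLoop, hex]
        rw [hAval, if_neg hc]
        have hhead : (cs.find? (fun p => p.2 == "KODEX " ++ k)).map Prod.fst = some t := by
          rw [← pv_filter_head]
          cases hfl : cs.filter (fun p => p.2 == "KODEX " ++ k) with
          | nil => rw [hfl] at hex; simp at hex
          | cons a l =>
            rw [hfl] at hex
            simp only [List.map_cons, List.cons.injEq] at hex
            simp [hex.1]
        have hbot : pvSfm (pvLt (pvK1 (k :: rest)) (pvK2 (k :: rest))) cs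
            = cs.find? (fun p => p.2 == "KODEX " ++ k) := by
          apply pvSfm_find_bottom
          · have hne : cs.filter (fun p => p.2 == "KODEX " ++ k) ≠ [] := by
              intro h0; rw [h0] at hex; simp at hex
            obtain ⟨z, hz⟩ := List.exists_mem_of_ne_nil _ hne
            have hz' := List.mem_filter.mp hz
            exact ⟨z, hz'.1, hz'.2⟩
          · intro x _ y _ hpy
            have hy : y.2 = "KODEX " ++ k := by simpa using hpy
            have hry : pvRank? (k :: rest) y.2 = some 0 := by
              unfold pvRank?; rw [List.findIdx?_cons]; simp [hy]
            have h1 : pvK1 (k :: rest) y = 0 := by simp [pvK1, hry]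
            have h2 : pvK2 (k :: rest) y = 0 := by simp [pvK2, hry]
            have hx1 := pvK1_nonneg (k :: rest) x
            have hx2 := pvK2_nonneg (k :: rest) x
            simp only [pvLt, h1, h2]
            simp only [Bool.or_eq_false_iff, Bool.and_eq_false_iff,
              decide_eq_false_iff_not, not_lt]
            constructor
            · exact hx1
            · right; simpa using hx2
          · intro x _ y _ hpx hpy
            have hx : x.2 = "KODEX " ++ k := by simpa using hpx
            have hrx : pvRank? (k :: rest) x.2 = some 0 := by
              unfold pvRank?; rw [List.findIdx?_cons]; simp [hx]
            have h1 : pvK1 (k :: rest) x = 0 := by simp [pvK1, hrx]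
            have hy1 : 1 ≤ pvK1 (k :: rest) y := by
              have hne : (("KODEX " ++ k) == y.2) = false := by
                rw [beq_eq_false_iff_ne]
                intro he
                rw [← he] at hpy
                simp at hpy
              have := pvRank?_cons_of_ne k rest y.2 hne
              unfold pvK1
              rw [this]
              cases hr : pvRank? rest y.2 <;> simp
            simp only [pvLt, h1]
            have : decide ((0:Int) < pvK1 (k :: rest) y) = true := by
              simp; omega
            simp [this]
        rw [hbot, hhead]
      | nil =>
        -- no exact match for k: A reduces to the rest; keys shift by one
        have hfilter : cs.filter (fun p => p.2 == "KODEX " ++ k) = [] :=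
          List.map_eq_nil_iff.mp hex
        have hnomatch : ∀ c ∈ cs, (("KODEX " ++ k) == c.2) = false := by
          intro c hcmem
          have h2 := List.filter_eq_nil_iff.mp hfilter c hcmem
          rw [beq_eq_false_iff_ne]
          intro he
          exact h2 (by simp [← he])
        have hAred : choose_best_ticker_py cs (k :: rest) = choose_best_ticker_py cs rest := by
          unfold choose_best_ticker_py
          simp only [if_neg hc, pvA_kwLoop, hex]
        rw [hAred, ih, if_neg hc, if_neg hc]
        congr 1
        apply pvSfm_congr
        intro x hx y hy
        have hshx := pvRank?_cons_of_ne k rest x.2 (hnomatch x hx)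
        have hshy := pvRank?_cons_of_ne k rest y.2 (hnomatch y hy)
        have e1x : pvK1 (k :: rest) x = pvK1 rest x + 1 := by
          unfold pvK1; rw [hshx]; cases hr : pvRank? rest x.2 <;> simp
        have e1y : pvK1 (k :: rest) y = pvK1 rest y + 1 := by
          unfold pvK1; rw [hshy]; cases hr : pvRank? rest y.2 <;> simp
        have e2x : pvK2 (k :: rest) x = pvK2 rest x := by
          unfold pvK2; rw [hshx]; cases hr : pvRank? rest x.2 <;> simp
        have e2y : pvK2 (k :: rest) y = pvK2 rest y := by
          unfold pvK2; rw [hshy]; cases hr : pvRank? rest y.2 <;> simp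
        simp only [pvLt, e1x, e1y, e2x, e2y]
        congr 2 <;> simp

-- B-side: B computes the same first minimum
theorem pvB_char (kws : List String) (cs : List (String × String)) :
    choose_best_ticker_py_alt cs kws
      = if cs = [] then none
        else (pvSfm (pvLt (pvK1 kws) (pvK2 kws)) cs).map Prod.fst := by
  unfold choose_best_ticker_py_alt
  by_cases hc : cs = []
  · simp [hc]
  · simp only [if_neg hc]
    have hget : ∀ s, ((PySem.List.enumerate kws).foldl
        (fun d p => d.setdefault ("KODEX " ++ p.2) p.1) PySem.Dict.empty).get? s
        = (pvRank? kws s).map (fun n => (n : Int)) := by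
      intro s
      rw [pv_dict_get]
      simp [PySem.Dict.get?, PySem.Dict.empty, Option.or]
    rw [pv_min2?_eq_sfm]
    congr 1
    apply pvSfm_congr
    intro x _ y _
    simp only [pvLt, hget]
    unfold pvK1 pvK2
    cases hrx : pvRank? kws x.2 <;> cases hry : pvRank? kws y.2 <;> simp

-- ===== VERDICT (by name: the statement is the Claim_ definition above) =====
theorem choose_best_ticker_py_spec : Claim_equal_choose_best_ticker_py := by
  intro candidates preferred_keywords _
  unfold Spec_choose_best_ticker_py
  rw [pvA_char, pvB_char]
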